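-- pv_equiv track=rewrite | github.com/vladluca70/NumSeq--Python-Library | build/lib/numseq/core.py | motzkin_numbers_up_to
-- ===== SOURCE A (Python) =====
-- def motzkin_numbers_up_to(n):
--     if n < 0:
--         raise ValueError("the number must be positive")
--     if n == 0:
--         raise ValueError("the number must be greater than 0")
--
--     motzkin_nbrs = [1, 1]
--     i = 2
--     while True:
--         next_val = motzkin_nbrs[i-1] + sum(motzkin_nbrs[k] * motzkin_nbrs[i-2-k] for k in range(i-1))
--         if next_val <= n:
--             motzkin_nbrs.append(next_val)
--             i += 1
--         else:
--             break
--     return motzkin_nbrs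
-- ===== SOURCE B (Python) =====
-- def motzkin_numbers_up_to(n):
--     if n < 0:
--         raise ValueError("the number must be positive")
--     if n == 0:
--         raise ValueError("the number must be greater than 0")
--
--     res = [1, 1]
--     a, b, i = 1, 1, 2
--     while True:
--         nxt = ((2 * i + 1) * b + (3 * i - 3) * a) // (i + 2)
--         if nxt > n:
--             break
--         res.append(nxt)
--         a, b = b, nxt
--         i += 1
--     return res
-- ===== Notes on version B (the rewrite author's own statement) =====
-- stated objective: alternative
-- what changed: Each new Motzkin term is computed by the three-term linear recurrence (i+2)*M_i = (2i+1)*M_{i-1} + (3i-3)*M_{i-2} from the last two terms, instead of A's self-convolution over the whole list built so far.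
import Mathlib
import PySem

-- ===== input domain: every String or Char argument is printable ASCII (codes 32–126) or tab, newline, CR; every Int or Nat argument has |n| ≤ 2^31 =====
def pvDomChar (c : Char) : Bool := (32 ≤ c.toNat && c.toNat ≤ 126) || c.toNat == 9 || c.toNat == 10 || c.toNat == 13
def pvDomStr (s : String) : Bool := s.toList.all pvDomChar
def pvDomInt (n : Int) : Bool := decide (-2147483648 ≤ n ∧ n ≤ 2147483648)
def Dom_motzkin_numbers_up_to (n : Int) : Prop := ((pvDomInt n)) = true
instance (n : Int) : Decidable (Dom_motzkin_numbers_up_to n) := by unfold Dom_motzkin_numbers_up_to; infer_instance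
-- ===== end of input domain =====

-- B replaces A's O(i)-term self-convolution per new term by the three-term Motzkin
-- recurrence (i+2)*M_i = (2i+1)*M_{i-1} + (3i-3)*M_{i-2}: O(1) arithmetic ops per term.

-- ===== PORT A =====
-- A's per-step expression: motzkin_nbrs[i-1] + sum(motzkin_nbrs[k]*motzkin_nbrs[i-2-k] for k in range(i-1)).
-- All indices are in range in every reachable state, so `getD _ 0` is exact for Python's indexing here.
def convStep (lst : List Int) (i : Nat) : Int :=
  lst.getD (i-1) 0 + ((List.range (i-1)).map (fun k => lst.getD k 0 * lst.getD (i-2-k) 0)).sum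

-- Fuel-bounded transcription of A's `while True` loop: 40 iterations always suffice on
-- Dom (|n| ≤ 2^31 < the 25th Motzkin number); the fuel only totalizes the loop.
def motzA_loop (n : Int) (lst : List Int) (i : Nat) : Nat → List Int
  | 0 => lst
  | fuel+1 =>
    let next_val := convStep lst i
    if next_val ≤ n then motzA_loop n (lst ++ [next_val]) (i+1) fuel else lst

def motzkin_numbers_up_to (n : Int) : List Int :=
  -- on nonpositive n Python raises ValueError; excluded by Pre_
  motzA_loop n [1, 1] 2 40

-- ===== PORT B =====
-- same fuel totalization of Source B's `while True` loop; `//` is exact here but ported as floordiv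
def motzB_loop (n : Int) (res : List Int) (a b : Int) (i : Nat) : Nat → List Int
  | 0 => res
  | fuel+1 =>
    let nxt := PySem.Int.floordiv ((2*(i:Int)+1)*b + (3*(i:Int)-3)*a) ((i:Int)+2)
    if n < nxt then res
    else motzB_loop n (res ++ [nxt]) b nxt (i+1) fuel

def motzkin_numbers_up_to_alt (n : Int) : List Int :=
  -- on nonpositive n Source B raises ValueError exactly like A; excluded by Pre_
  motzB_loop n [1, 1] 1 1 2 40

-- ===== PRECONDITION & SPEC =====
-- A raises ValueError on every nonpositive n (B raises identically there); Pre_ excludes exactly those.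
def Pre_motzkin_numbers_up_to (n : Int) : Prop := 1 ≤ n
instance (n : Int) : Decidable (Pre_motzkin_numbers_up_to n) := by unfold Pre_motzkin_numbers_up_to; infer_instance
def pvWitness_motzkin_numbers_up_to : Int := (5)

def Spec_motzkin_numbers_up_to (n : Int) (out : List Int) : Prop := out = motzkin_numbers_up_to_alt n
instance (n : Int) (out : List Int) : Decidable (Spec_motzkin_numbers_up_to n out) := by unfold Spec_motzkin_numbers_up_to; infer_instance

-- ===== CLAIM (what is proved, stated in full; the proofs are below) =====
def Claim_equal_motzkin_numbers_up_to : Prop := ∀ (n : Int), Dom_motzkin_numbers_up_to n → Pre_motzkin_numbers_up_to n → Spec_motzkin_numbers_up_to n (motzkin_numbers_up_to n)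

-- ===== LEMMAS AND PROOFS =====

-- abstract "append while ≤ n" loop over a fixed stream of term values
def pvGo (m : Nat → Int) (n : Int) (i : Nat) : Nat → List Int
  | 0 => []
  | fuel+1 => if m i ≤ n then m i :: pvGo m n (i+1) fuel else []

-- A's term stream: the convolution-defined Motzkin values
def mAlist : Nat → List Int
  | 0 => [1, 1]
  | k+1 => mAlist k ++ [convStep (mAlist k) (k+2)]

def mA (i : Nat) : Int := (mAlist i).getD i 0

-- B's term stream: the linear-recurrence Motzkin values; mBp k = (M_k, M_{k+1})
def mBp : Nat → Int × Int
  | 0 => (1, 1)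
  | k+1 => ((mBp k).2,
      PySem.Int.floordiv ((2*((k:Int)+2)+1)*(mBp k).2 + (3*((k:Int)+2)-3)*(mBp k).1) (((k:Int)+2)+2))

def mB (i : Nat) : Int := (mBp i).1

lemma mAlist_length (k : Nat) : (mAlist k).length = k + 2 := by
  induction k with
  | zero => rfl
  | succ k ih => simp [mAlist, ih]

lemma mAlist_getD_succ (k i : Nat) (h : i ≤ k + 1) :
    (mAlist (k+1)).getD i 0 = (mAlist k).getD i 0 := by
  have hl : i < (mAlist k).length := by rw [mAlist_length]; omega
  conv_lhs => rw [mAlist]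
  simp only [List.getD_eq_getElem?_getD]
  rw [List.getElem?_append_left hl]

lemma mAlist_getD_add (d k i : Nat) (h : i ≤ k + 1) :
    (mAlist (k + d)).getD i 0 = (mAlist k).getD i 0 := by
  induction d with
  | zero => rfl
  | succ d ih =>
    have he : k + (d + 1) = (k + d) + 1 := by omega
    rw [he, mAlist_getD_succ _ _ (by omega), ih]

lemma mAlist_getD (k i : Nat) (h : i ≤ k + 1) : (mAlist k).getD i 0 = mA i := by
  unfold mA
  have h1 : (mAlist (k + i)).getD i 0 = (mAlist k).getD i 0 := mAlist_getD_add i k i h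
  have h2 : (mAlist (i + k)).getD i 0 = (mAlist i).getD i 0 := mAlist_getD_add k i i (by omega)
  rw [Nat.add_comm k i] at h1
  rw [← h1, h2]

-- the appended element of mAlist (k+1), i.e. A's next_val at state (mAlist k, i = k+2), is mA (k+2)
lemma mA_succ_eq (k : Nat) : mA (k+2) = convStep (mAlist k) (k+2) := by
  have h1 : (mAlist (k+1)).getD (k+2) 0 = mA (k+2) := mAlist_getD (k+1) (k+2) (by omega)
  rw [← h1]
  conv_lhs => rw [mAlist]
  rw [List.getD_eq_getElem?_getD, List.getElem?_append_right (by rw [mAlist_length])]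
  simp [mAlist_length]

lemma loopA_eq (n : Int) : ∀ fuel k,
    motzA_loop n (mAlist k) (k+2) fuel = mAlist k ++ pvGo mA n (k+2) fuel := by
  intro fuel
  induction fuel with
  | zero => intro k; simp [motzA_loop, pvGo]
  | succ fuel ih =>
    intro k
    rw [motzA_loop, pvGo]
    show (if convStep (mAlist k) (k+2) ≤ n then
            motzA_loop n (mAlist k ++ [convStep (mAlist k) (k+2)]) (k+3) fuel
          else mAlist k) = _
    rw [← mA_succ_eq]
    have happ : mAlist k ++ [mA (k+2)] = mAlist (k+1) := by rw [mA_succ_eq]; rfl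
    by_cases hc : mA (k+2) ≤ n
    · rw [if_pos hc, if_pos hc, happ]
      have hih := ih (k+1)
      rw [show (k+1)+2 = k+3 from rfl] at hih
      rw [hih, ← happ]
      simp
    · rw [if_neg hc, if_neg hc]
      simp

lemma mBp_fst_succ (k : Nat) : (mBp (k+1)).1 = (mBp k).2 := by rw [mBp]

lemma mB_succ_eq (k : Nat) :
    mB (k+2) = PySem.Int.floordiv
      ((2*(((k+2 : Nat)) : Int)+1)*(mBp k).2 + (3*(((k+2 : Nat)) : Int)-3)*(mBp k).1)
      ((((k+2 : Nat)) : Int)+2) := by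
  unfold mB
  rw [show k+2 = (k+1)+1 from rfl, mBp_fst_succ]
  show (mBp (k+1)).2 = _
  conv_lhs => rw [mBp]
  push_cast
  ring_nf

lemma loopB_eq (n : Int) : ∀ fuel k (res : List Int),
    motzB_loop n res (mBp k).1 (mBp k).2 (k+2) fuel = res ++ pvGo mB n (k+2) fuel := by
  intro fuel
  induction fuel with
  | zero => intro k res; simp [motzB_loop, pvGo]
  | succ fuel ih =>
    intro k res
    rw [motzB_loop, pvGo]
    show (if n < PySem.Int.floordiv
            ((2*(((k+2 : Nat)) : Int)+1)*(mBp k).2 + (3*(((k+2 : Nat)) : Int)-3)*(mBp k).1)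
            ((((k+2 : Nat)) : Int)+2)
          then res
          else motzB_loop n (res ++ [PySem.Int.floordiv
            ((2*(((k+2 : Nat)) : Int)+1)*(mBp k).2 + (3*(((k+2 : Nat)) : Int)-3)*(mBp k).1)
            ((((k+2 : Nat)) : Int)+2)]) (mBp k).2 (PySem.Int.floordiv
            ((2*(((k+2 : Nat)) : Int)+1)*(mBp k).2 + (3*(((k+2 : Nat)) : Int)-3)*(mBp k).1)
            ((((k+2 : Nat)) : Int)+2)) (k+3) fuel) = _
    rw [← mB_succ_eq]
    by_cases hc : mB (k+2) ≤ n
    · rw [if_neg (by omega), if_pos hc]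
      have hb1 : (mBp (k+1)).1 = (mBp k).2 := mBp_fst_succ k
      have hb2 : (mBp (k+1)).2 = mB (k+2) := by
        unfold mB; rw [show k+2 = (k+1)+1 from rfl, mBp_fst_succ]
      have hih := ih (k+1) (res ++ [mB (k+2)])
      rw [hb1, hb2, show (k+1)+2 = k+3 from rfl] at hih
      rw [hih]
      simp
    · rw [if_pos (by omega), if_neg hc]
      simp

lemma pvGo_congr (m1 m2 : Nat → Int) (n : Int) : ∀ fuel i,
    (∀ j, j < fuel → m1 (i+j) = m2 (i+j)) → pvGo m1 n i fuel = pvGo m2 n i fuel := by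
  intro fuel
  induction fuel with
  | zero => intro i _; rfl
  | succ fuel ih =>
    intro i h
    have h0 : m1 i = m2 i := by have := h 0 (by omega); simpa using this
    rw [pvGo, pvGo, h0]
    by_cases hc : m2 i ≤ n
    · rw [if_pos hc, if_pos hc, ih (i+1) (fun j hj => by
        have := h (j+1) (by omega); rw [show i + 1 + j = i + (j+1) by omega]; exact this)]
    · rw [if_neg hc, if_neg hc]

-- the two streams agree on every index either loop can reach within its fuel
lemma mAB_agree : ∀ j, j < 40 → mA (2+j) = mB (2+j) := by decide

-- ===== VERDICT (by name: the statement is the Claim_ definition above) =====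
theorem motzkin_numbers_up_to_spec : Claim_equal_motzkin_numbers_up_to := by
  intro n _ _
  unfold Spec_motzkin_numbers_up_to motzkin_numbers_up_to motzkin_numbers_up_to_alt
  have hA := loopA_eq n 40 0
  have hB := loopB_eq n 40 0 [1, 1]
  simp only [show mAlist 0 = [1, 1] from rfl] at hA
  simp only [show (mBp 0).1 = 1 from rfl, show (mBp 0).2 = 1 from rfl] at hB
  rw [hA, hB, pvGo_congr mA mB n 40 2 mAB_agree]
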